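-- pv_equiv track=rewrite | github.com/pypi-data/pypi-mirror-380 | packages/metis-agent/metis_agent-0.20.0-py3-none-any.whl/metis_agent/core/refactored/orchestrator/validators.py | _has_good_structure
-- ===== SOURCE A (Python) =====
-- def _has_good_structure(content: str) -> bool:
--     """Check if content has good structure."""
--     # Check for various structure indicators
--     structure_indicators = [
--         '\n',  # Line breaks
--         ':',   # Colons (key-value pairs)
--         '{',   # JSON/dict structure
--         '<',   # HTML/XML structure
--         '#',   # Markdown headers
--         '-',   # Lists
--         '|',   # Tables
--     ]
--
--     indicator_count = sum(
--         1 for indicator in structure_indicators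
--         if indicator in content
--     )
--
--     return indicator_count >= 2
-- ===== SOURCE B (Python) =====
-- def _has_good_structure(content: str) -> bool:
--     """Check if content has good structure."""
--     indicators = {'\n', ':', '{', '<', '#', '-', '|'}
--     seen = set()
--     for ch in content:
--         if ch in indicators:
--             seen.add(ch)
--             if len(seen) >= 2:
--                 return True
--     return False
-- ===== Notes on version B (the rewrite author's own statement) =====
-- stated objective: alternative
-- what changed: Replaces seven independent substring scans of content with a single left-to-right pass over content's characters that maintains a set of distinct indicator characters seen and returns True as soon as two are found.
import Mathlib
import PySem

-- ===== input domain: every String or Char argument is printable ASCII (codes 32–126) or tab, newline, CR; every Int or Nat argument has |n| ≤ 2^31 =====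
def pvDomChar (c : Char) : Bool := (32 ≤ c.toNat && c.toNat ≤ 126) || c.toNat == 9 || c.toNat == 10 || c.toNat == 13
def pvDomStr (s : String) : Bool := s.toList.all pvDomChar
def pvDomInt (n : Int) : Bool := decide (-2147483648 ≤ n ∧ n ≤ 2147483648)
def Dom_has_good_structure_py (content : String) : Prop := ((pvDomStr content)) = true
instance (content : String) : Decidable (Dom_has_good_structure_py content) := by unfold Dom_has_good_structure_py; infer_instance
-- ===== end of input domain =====

-- B replaces seven independent substring scans with one pass over the characters keeping a set of indicators seen (alternative decomposition).

-- ===== PORT A =====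
def has_good_structure_py (content : String) : Bool :=
  let structure_indicators : List String := ["\n", ":", "{", "<", "#", "-", "|"]
  let indicator_count : Int :=
    structure_indicators.foldl
      (fun acc indicator => if PySem.Str.isIn indicator content then acc + 1 else acc) 0
  indicator_count ≥ 2

-- ===== PORT B =====
def pvIndicators : List Char := ['\n', ':', '{', '<', '#', '-', '|']

def pvScan : List Char → PySem.Set Char → Bool
  | [], _ => false
  | ch :: rest, seen =>
    if pvIndicators.contains ch then
      let seen' := PySem.Set.add seen ch
      if 2 ≤ seen'.length then true else pvScan rest seen'
    else pvScan rest seen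

def has_good_structure_py_alt (content : String) : Bool :=
  pvScan content.toList PySem.Set.empty

-- ===== PRECONDITION & SPEC =====
def Spec_has_good_structure_py (content : String) (out : Bool) : Prop := out = has_good_structure_py_alt content
instance (content : String) (out : Bool) : Decidable (Spec_has_good_structure_py content out) := by unfold Spec_has_good_structure_py; infer_instance

-- ===== CLAIM (what is proved, stated in full; the proofs are below) =====
def Claim_equal_has_good_structure_py : Prop := ∀ (content : String), Dom_has_good_structure_py content → Spec_has_good_structure_py content (has_good_structure_py content)

-- ===== LEMMAS AND PROOFS =====

theorem pv_singleton_infix_iff {a : Char} {l : List Char} : [a] <:+: l ↔ a ∈ l := by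
  constructor
  · intro h; exact h.mem (by simp)
  · intro h
    obtain ⟨s, t, rfl⟩ := List.append_of_mem h
    exact ⟨s, t, by simp⟩

theorem pv_isIn_single (s : String) (a : Char) (t : String) (h : s.toList = [a]) :
    PySem.Str.isIn s t = t.toList.contains a := by
  rw [Bool.eq_iff_iff, PySem.Str.isIn_iff_infix, h, pv_singleton_infix_iff]
  simp

theorem pv_update_cons (seen : PySem.Set Char) (c : Char) (l : List Char) :
    PySem.Set.update seen (c :: l) = PySem.Set.update (PySem.Set.add seen c) l := rfl

theorem pv_length_le_update (s : PySem.Set Char) (l : List Char) :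
    s.length ≤ (PySem.Set.update s l).length := by
  rw [PySem.Set.update_eq_append_filter]
  simp

theorem pv_scan_invariant (l : List Char) (seen : PySem.Set Char) (hnd : seen.Nodup)
    (hlen : seen.length ≤ 1) :
    pvScan l seen = decide (2 ≤ (PySem.Set.update seen (l.filter (fun c => pvIndicators.contains c))).length) := by
  induction l generalizing seen with
  | nil =>
    have : PySem.Set.update seen [] = seen := rfl
    simp only [pvScan, List.filter_nil, this]
    have : ¬ 2 ≤ seen.length := by omega
    simp [this]
  | cons c rest ih =>
    by_cases hc : pvIndicators.contains c
    · simp only [pvScan, if_true, List.filter_cons, hc, pv_update_cons]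
      by_cases h2 : 2 ≤ (PySem.Set.add seen c).length
      · have h3 : 2 ≤ (PySem.Set.update (PySem.Set.add seen c) (rest.filter (fun c => pvIndicators.contains c))).length :=
          le_trans h2 (pv_length_le_update _ _)
        rw [if_pos h2]
        exact (decide_eq_true h3).symm
      · have hlen' : (PySem.Set.add seen c).length ≤ 1 := by omega
        simp only [h2, if_false]
        exact ih (PySem.Set.add seen c) (PySem.Set.nodup_add seen c hnd) hlen'
    · simp only [pvScan, hc, List.filter_cons]
      simp only [Bool.false_eq_true, if_false]
      exact ih seen hnd hlen

theorem pv_countP_eq (content : String) :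
    (pvIndicators.countP (fun c => content.toList.contains c))
      = (PySem.Set.ofList (content.toList.filter (fun c => pvIndicators.contains c))).length := by
  have h1 : (pvIndicators.filter (fun c => content.toList.contains c)).length
      = (PySem.Set.ofList (content.toList.filter (fun c => pvIndicators.contains c))).length := by
    apply List.Perm.length_eq
    apply List.perm_of_nodup_nodup_toFinset_eq
    · exact (by decide : pvIndicators.Nodup).filter _
    · exact PySem.Set.nodup_ofList _
    · ext x
      simp [PySem.Set.mem_ofList, List.mem_filter, and_comm]
  rw [← h1, List.countP_eq_length_filter]

theorem has_good_structure_py_eq_alt (content : String) :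
    has_good_structure_py content = has_good_structure_py_alt content := by
  have hcount : (["\n", ":", "{", "<", "#", "-", "|"] : List String).countP
        (fun indicator => PySem.Str.isIn indicator content)
      = pvIndicators.countP (fun c => content.toList.contains c) := by
    simp only [List.countP_cons, List.countP_nil, pvIndicators,
      pv_isIn_single "\n" '\n' content rfl, pv_isIn_single ":" ':' content rfl,
      pv_isIn_single "{" '{' content rfl, pv_isIn_single "<" '<' content rfl,
      pv_isIn_single "#" '#' content rfl, pv_isIn_single "-" '-' content rfl,
      pv_isIn_single "|" '|' content rfl]
  have hA : has_good_structure_py content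
      = decide ((2 : Int) ≤ (pvIndicators.countP (fun c => content.toList.contains c) : Int)) := by
    unfold has_good_structure_py
    simp only [PySem.List.foldl_if_add_one, zero_add, hcount, ge_iff_le]
  have hB : has_good_structure_py_alt content
      = decide (2 ≤ (PySem.Set.ofList (content.toList.filter (fun c => pvIndicators.contains c))).length) := by
    unfold has_good_structure_py_alt
    rw [pv_scan_invariant content.toList PySem.Set.empty List.nodup_nil (by simp [PySem.Set.empty])]
    rfl
  rw [hA, hB, pv_countP_eq]
  simp

-- ===== VERDICT (by name: the statement is the Claim_ definition above) =====
theorem has_good_structure_py_spec : Claim_equal_has_good_structure_py := by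
  intro content _
  unfold Spec_has_good_structure_py
  exact has_good_structure_py_eq_alt content
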